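-- pv_equiv track=rewrite | github.com/OXERIS/web-sitedemo | score_calculator.py | calculate_foreign_work_experience_language_skill_transferability_score
-- ===== SOURCE A (Python) =====
-- def calculate_foreign_work_experience_language_skill_transferability_score(foreign_work_experience, first_language_scores):
--     """
--     计算基于海外工作经验和官方语言能力结合的技能迁移因素得分。
--     :param foreign_work_experience: str, 海外工作经验代码
--     :param first_language_scores: dict, 第一官方语言各项能力的等级，键为 'reading', 'writing', 'speaking', 'listening'
--     :return: int, 技能迁移因素得分
--     """
--     # 定义得分表
--     score_table = {
--         "no_foreign_experience": {"clb_7_or_more": 0, "clb_9_or_more": 0},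
--         "one_or_two_years": {"clb_7_or_more": 13, "clb_9_or_more": 25},
--         "three_or_more_years": {"clb_7_or_more": 25, "clb_9_or_more": 50}
--     }
--
--     # 检查第一官方语言各项能力是否达到 CLB 7 及以上
--     all_clb7_or_higher = all(
--         score in ["clb_7", "clb_8", "clb_9", "clb_10_or_more"] for score in first_language_scores.values()
--     )
--
--     # 检查第一官方语言各项能力是否达到 CLB 9 及以上
--     all_clb9_or_higher = all(
--         score in ["clb_9", "clb_10_or_more"] for score in first_language_scores.values()
--     )
--
--     if all_clb9_or_higher:
--         language_level = "clb_9_or_more"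
--     elif all_clb7_or_higher:
--         language_level = "clb_7_or_more"
--     else:
--         language_level = "below_clb_7"
--
--     if language_level == "below_clb_7":
--         return 0
--     else:
--         foreign_experience_scores = score_table.get(foreign_work_experience, {"clb_7_or_more": 0, "clb_9_or_more": 0})
--         score = foreign_experience_scores.get(language_level, 0)
--         return score
-- ===== SOURCE B (Python) =====
-- _RANK = {"clb_7": 7, "clb_8": 8, "clb_9": 9, "clb_10_or_more": 10}
-- _TABLE = {"one_or_two_years": (13, 25), "three_or_more_years": (25, 50)}
--
--
-- def calculate_foreign_work_experience_language_skill_transferability_score(foreign_work_experience, first_language_scores):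
--     worst = min((_RANK.get(s, 0) for s in first_language_scores.values()), default=9)
--     if worst < 7:
--         return 0
--     low, high = _TABLE.get(foreign_work_experience, (0, 0))
--     return high if worst >= 9 else low
-- ===== Notes on version B (the rewrite author's own statement) =====
-- stated objective: simpler
-- what changed: Replaces the two separate all()-membership passes and the nested score-table-of-dicts lookup by one ordinal rank map: a single min() over the scores' ranks (default 9 on an empty dict) picks the worst CLB tier, and one flat table of (clb7,clb9) pairs yields the score.
import Mathlib
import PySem

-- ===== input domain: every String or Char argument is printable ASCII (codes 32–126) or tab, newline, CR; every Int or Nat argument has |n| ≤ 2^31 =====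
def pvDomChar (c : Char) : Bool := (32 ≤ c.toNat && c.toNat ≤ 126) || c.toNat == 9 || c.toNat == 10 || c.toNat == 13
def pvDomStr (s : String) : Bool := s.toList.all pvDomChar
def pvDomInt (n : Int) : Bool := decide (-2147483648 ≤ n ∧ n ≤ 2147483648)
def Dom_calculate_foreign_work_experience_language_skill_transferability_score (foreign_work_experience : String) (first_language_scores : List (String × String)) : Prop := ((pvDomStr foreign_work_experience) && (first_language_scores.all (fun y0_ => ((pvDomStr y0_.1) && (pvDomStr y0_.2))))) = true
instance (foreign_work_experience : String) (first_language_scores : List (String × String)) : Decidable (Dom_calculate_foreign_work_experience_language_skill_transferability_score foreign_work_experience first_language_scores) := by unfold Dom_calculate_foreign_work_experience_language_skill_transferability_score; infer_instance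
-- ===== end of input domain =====

-- B replaces A's two all()-membership passes and nested table-of-dicts by one min() over an
-- ordinal rank map plus a flat (clb7,clb9)-pair table; objective: simpler.

-- ===== PORT A =====
def calculate_foreign_work_experience_language_skill_transferability_score (foreign_work_experience : String) (first_language_scores : List (String × String)) : Int :=
  let score_table : PySem.Dict String (PySem.Dict String Int) :=
    PySem.Dict.ofList
      [("no_foreign_experience", PySem.Dict.ofList [("clb_7_or_more", 0), ("clb_9_or_more", 0)]),
       ("one_or_two_years", PySem.Dict.ofList [("clb_7_or_more", 13), ("clb_9_or_more", 25)]),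
       ("three_or_more_years", PySem.Dict.ofList [("clb_7_or_more", 25), ("clb_9_or_more", 50)])]
  let vals := (PySem.Dict.ofList first_language_scores).values
  let all_clb7_or_higher := vals.all (fun score =>
    decide (score = "clb_7" ∨ score = "clb_8" ∨ score = "clb_9" ∨ score = "clb_10_or_more"))
  let all_clb9_or_higher := vals.all (fun score =>
    decide (score = "clb_9" ∨ score = "clb_10_or_more"))
  let language_level :=
    if all_clb9_or_higher then "clb_9_or_more"
    else if all_clb7_or_higher then "clb_7_or_more"
    else "below_clb_7"
  if language_level = "below_clb_7" then 0
  else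
    let foreign_experience_scores :=
      score_table.getD foreign_work_experience (PySem.Dict.ofList [("clb_7_or_more", 0), ("clb_9_or_more", 0)])
    foreign_experience_scores.getD language_level 0

-- ===== PORT B =====
def pvRankB : PySem.Dict String Int :=
  PySem.Dict.ofList [("clb_7", 7), ("clb_8", 8), ("clb_9", 9), ("clb_10_or_more", 10)]

def pvTableB : PySem.Dict String (Int × Int) :=
  PySem.Dict.ofList [("one_or_two_years", ((13 : Int), (25 : Int))), ("three_or_more_years", (25, 50))]

def calculate_foreign_work_experience_language_skill_transferability_score_alt (foreign_work_experience : String) (first_language_scores : List (String × String)) : Int :=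
  let worst := (PySem.List.min?
      (((PySem.Dict.ofList first_language_scores).values).map (fun s => pvRankB.getD s 0))
      (fun x => x)).getD 9
  if worst < 7 then 0
  else
    let p := pvTableB.getD foreign_work_experience ((0 : Int), (0 : Int))
    if 9 ≤ worst then p.2 else p.1

-- ===== PRECONDITION & SPEC =====
def Spec_calculate_foreign_work_experience_language_skill_transferability_score (foreign_work_experience : String) (first_language_scores : List (String × String)) (out : Int) : Prop := out = calculate_foreign_work_experience_language_skill_transferability_score_alt foreign_work_experience first_language_scores
instance (foreign_work_experience : String) (first_language_scores : List (String × String)) (out : Int) : Decidable (Spec_calculate_foreign_work_experience_language_skill_transferability_score foreign_work_experience first_language_scores out) := by unfold Spec_calculate_foreign_work_experience_language_skill_transferability_score; infer_instance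

-- ===== CLAIM (what is proved, stated in full; the proofs are below) =====
def Claim_equal_calculate_foreign_work_experience_language_skill_transferability_score : Prop := ∀ (foreign_work_experience : String) (first_language_scores : List (String × String)), Dom_calculate_foreign_work_experience_language_skill_transferability_score foreign_work_experience first_language_scores → Spec_calculate_foreign_work_experience_language_skill_transferability_score foreign_work_experience first_language_scores (calculate_foreign_work_experience_language_skill_transferability_score foreign_work_experience first_language_scores)

-- ===== LEMMAS AND PROOFS =====

theorem pv_rank_ge9 (s : String) : (9 ≤ pvRankB.getD s 0) ↔ (s = "clb_9" ∨ s = "clb_10_or_more") := by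
  simp only [pvRankB, PySem.Dict.ofList, PySem.Dict.getD_eq_get?_getD, PySem.Dict.update,
    List.foldl, PySem.Dict.get?_insert, PySem.Dict.get?_empty]
  split_ifs <;> simp_all
theorem pv_rank_ge7 (s : String) : (7 ≤ pvRankB.getD s 0) ↔ (s = "clb_7" ∨ s = "clb_8" ∨ s = "clb_9" ∨ s = "clb_10_or_more") := by
  simp only [pvRankB, PySem.Dict.ofList, PySem.Dict.getD_eq_get?_getD, PySem.Dict.update,
    List.foldl, PySem.Dict.get?_insert, PySem.Dict.get?_empty]
  split_ifs <;> simp_all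
theorem pv_foldl_min_ge (c : Int) (l : List Int) (a : Int) :
    (c ≤ l.foldl min a) ↔ (c ≤ a ∧ ∀ x ∈ l, c ≤ x) := by
  induction l generalizing a with
  | nil => simp
  | cons b t ih => simp [List.foldl, ih]; tauto
theorem pv_worst_ge (c : Int) (f : String → Int) (vs : List String) (hc : c ≤ 9) :
    (c ≤ (PySem.List.min? (vs.map f) (fun x => x)).getD 9) ↔ (∀ s ∈ vs, c ≤ f s) := by
  cases vs with
  | nil => simpa using hc
  | cons v t =>
    simp only [List.map, PySem.List.min?_id_cons, Option.getD_some, pv_foldl_min_ge]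
    simp

theorem pv_main (fwe : String) (fls : List (String × String)) :
    calculate_foreign_work_experience_language_skill_transferability_score fwe fls =
      calculate_foreign_work_experience_language_skill_transferability_score_alt fwe fls := by
  unfold calculate_foreign_work_experience_language_skill_transferability_score calculate_foreign_work_experience_language_skill_transferability_score_alt
  set vs := (PySem.Dict.ofList fls).values with hvs
  set worst := (PySem.List.min? (vs.map (fun s => pvRankB.getD s 0)) (fun x => x)).getD 9 with hworst
  by_cases h9 : ∀ s ∈ vs, s = "clb_9" ∨ s = "clb_10_or_more"
  · have b9 : vs.all (fun s => decide (s = "clb_9" ∨ s = "clb_10_or_more")) = true := by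
      simpa [List.all_eq_true] using h9
    have hw : 9 ≤ worst := (pv_worst_ge 9 _ vs (by norm_num)).2
      (fun s hs => (pv_rank_ge9 s).2 (h9 s hs))
    have hn7 : ¬ worst < 7 := by omega
    simp only [b9, if_true]
    rw [if_neg (by decide : ¬ ("clb_9_or_more" : String) = "below_clb_7"), if_neg hn7, if_pos hw]
    simp only [pvTableB, PySem.Dict.ofList, PySem.Dict.getD_eq_get?_getD, PySem.Dict.update,
      List.foldl, PySem.Dict.get?_insert, PySem.Dict.get?_empty]
    split_ifs <;> simp_all
  · have b9 : vs.all (fun s => decide (s = "clb_9" ∨ s = "clb_10_or_more")) = false := by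
      have : ¬ (vs.all (fun s => decide (s = "clb_9" ∨ s = "clb_10_or_more")) = true) := by
        simpa [List.all_eq_true] using h9
      simpa using this
    have hnw : ¬ 9 ≤ worst := fun hw =>
      h9 (fun s hs => (pv_rank_ge9 s).1 ((pv_worst_ge 9 _ vs (by norm_num)).1 hw s hs))
    by_cases h7 : ∀ s ∈ vs, s = "clb_7" ∨ s = "clb_8" ∨ s = "clb_9" ∨ s = "clb_10_or_more"
    · have b7 : vs.all (fun s => decide (s = "clb_7" ∨ s = "clb_8" ∨ s = "clb_9" ∨ s = "clb_10_or_more")) = true := by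
        simpa [List.all_eq_true] using h7
      have hw7 : 7 ≤ worst := (pv_worst_ge 7 _ vs (by norm_num)).2
        (fun s hs => (pv_rank_ge7 s).2 (h7 s hs))
      have hn7 : ¬ worst < 7 := by omega
      simp only [b9, b7, Bool.false_eq_true, if_false, if_true]
      rw [if_neg (by decide : ¬ ("clb_7_or_more" : String) = "below_clb_7"), if_neg hn7, if_neg hnw]
      simp only [pvTableB, PySem.Dict.ofList, PySem.Dict.getD_eq_get?_getD, PySem.Dict.update,
        List.foldl, PySem.Dict.get?_insert, PySem.Dict.get?_empty]
      split_ifs <;> simp_all <;> decide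
    · have b7 : vs.all (fun s => decide (s = "clb_7" ∨ s = "clb_8" ∨ s = "clb_9" ∨ s = "clb_10_or_more")) = false := by
        have : ¬ (vs.all (fun s => decide (s = "clb_7" ∨ s = "clb_8" ∨ s = "clb_9" ∨ s = "clb_10_or_more")) = true) := by
          simpa [List.all_eq_true] using h7
        simpa using this
      have hnw7 : worst < 7 := by
        by_contra hge
        have hge' : 7 ≤ worst := by omega
        exact h7 (fun s hs => (pv_rank_ge7 s).1 ((pv_worst_ge 7 _ vs (by norm_num)).1 hge' s hs))
      simp only [b9, b7, Bool.false_eq_true, if_false]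
      simp only [if_true, if_pos hnw7]

-- ===== VERDICT (by name: the statement is the Claim_ definition above) =====
theorem calculate_foreign_work_experience_language_skill_transferability_score_spec : Claim_equal_calculate_foreign_work_experience_language_skill_transferability_score := by
  intro fwe fls _
  exact pv_main fwe fls
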